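-- pv_equiv track=rewrite | github.com/Crusty696/pb_studio | src/pb_studio/pacing/audio_visual_mapper.py | _detect_temperature
-- ===== SOURCE A (Python) =====
-- def _detect_temperature(colors: list[tuple[int, int, int]]) -> str:
--     """Detect overall temperature from RGB colors."""
--     warm_score = 0
--     cool_score = 0
--
--     for r, g, b in colors:
--         if r > b:
--             warm_score += r - b
--         else:
--             cool_score += b - r
--
--     diff = warm_score - cool_score
--     if diff > 50:
--         return "WARM"
--     elif diff < -50:
--         return "COOL"
--     else:
--         return "NEUTRAL"
-- ===== SOURCE B (Python) =====
-- def _detect_temperature(colors: list[tuple[int, int, int]]) -> str: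
--     """Detect overall temperature from RGB colors."""
--     # Staged channel totals: sum the red channel and the blue channel
--     # separately, then compare the totals. No per-pixel difference,
--     # no branch, no paired accumulators.
--     total_red = sum(c[0] for c in colors)
--     total_blue = sum(c[2] for c in colors)
--     if total_red > total_blue + 50:
--         return "WARM"
--     if total_blue > total_red + 50:
--         return "COOL"
--     return "NEUTRAL"
-- ===== Notes on version B (the rewrite author's own statement) =====
-- stated objective: simpler
-- what changed: Replaces A's single loop with conditional warm/cool accumulators by two staged whole-channel sums (total red, total blue) compared directly against each other with a 50 margin; no per-pixel difference or branch is ever computed.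
import Mathlib
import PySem

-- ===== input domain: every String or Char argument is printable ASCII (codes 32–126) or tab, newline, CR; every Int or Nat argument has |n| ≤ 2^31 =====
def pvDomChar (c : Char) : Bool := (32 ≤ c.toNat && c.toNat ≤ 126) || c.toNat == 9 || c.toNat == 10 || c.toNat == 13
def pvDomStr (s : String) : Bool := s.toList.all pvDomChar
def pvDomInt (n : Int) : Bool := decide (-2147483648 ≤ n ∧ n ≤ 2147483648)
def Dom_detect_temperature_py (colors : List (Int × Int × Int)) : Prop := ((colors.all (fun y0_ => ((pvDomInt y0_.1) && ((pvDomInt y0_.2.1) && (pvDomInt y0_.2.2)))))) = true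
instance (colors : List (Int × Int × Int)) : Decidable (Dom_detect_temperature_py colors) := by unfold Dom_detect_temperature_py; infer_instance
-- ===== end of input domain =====

-- B replaces A's conditional warm/cool accumulator loop by two staged whole-channel sums
-- (total red, total blue) compared directly with a 50 margin.

-- ===== PORT A =====
def detect_temperature_py (colors : List (Int × Int × Int)) : String :=
  let scores := colors.foldl (fun (st : Int × Int) c =>
    let (r, _g, b) := c
    if r > b then (st.1 + (r - b), st.2) else (st.1, st.2 + (b - r))) (0, 0)
  let diff := scores.1 - scores.2
  if diff > 50 then "WARM"
  else if diff < -50 then "COOL"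
  else "NEUTRAL"

-- ===== PORT B =====
def detect_temperature_py_alt (colors : List (Int × Int × Int)) : String :=
  let total_red : Int := (colors.map (fun c => c.1)).sum
  let total_blue : Int := (colors.map (fun c => c.2.2)).sum
  if total_red > total_blue + 50 then "WARM"
  else if total_blue > total_red + 50 then "COOL"
  else "NEUTRAL"

-- ===== PRECONDITION & SPEC =====
def Spec_detect_temperature_py (colors : List (Int × Int × Int)) (out : String) : Prop := out = detect_temperature_py_alt colors
instance (colors : List (Int × Int × Int)) (out : String) : Decidable (Spec_detect_temperature_py colors out) := by unfold Spec_detect_temperature_py; infer_instance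

-- ===== CLAIM (what is proved, stated in full; the proofs are below) =====
def Claim_equal_detect_temperature_py : Prop := ∀ (colors : List (Int × Int × Int)), Dom_detect_temperature_py colors → Spec_detect_temperature_py colors (detect_temperature_py colors)

-- ===== LEMMAS AND PROOFS =====

-- invariant: A's two accumulators minus each other equal the channel-total difference plus the carry
lemma fold_scores (colors : List (Int × Int × Int)) (w c : Int) :
    (colors.foldl (fun (st : Int × Int) cl =>
      let (r, _g, b) := cl
      if r > b then (st.1 + (r - b), st.2) else (st.1, st.2 + (b - r))) (w, c)).1
    - (colors.foldl (fun (st : Int × Int) cl =>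
      let (r, _g, b) := cl
      if r > b then (st.1 + (r - b), st.2) else (st.1, st.2 + (b - r))) (w, c)).2
    = (w - c) + ((colors.map (fun cl => cl.1)).sum - (colors.map (fun cl => cl.2.2)).sum) := by
  induction colors generalizing w c with
  | nil => simp
  | cons hd tl ih =>
    obtain ⟨r, g, b⟩ := hd
    simp only [List.foldl, List.map, List.sum_cons]
    by_cases hrb : r > b
    · rw [if_pos hrb, ih]; ring
    · rw [if_neg hrb, ih]; ring

-- ===== VERDICT (by name: the statement is the Claim_ definition above) =====
theorem detect_temperature_py_spec : Claim_equal_detect_temperature_py := by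
  intro colors _
  show detect_temperature_py colors = detect_temperature_py_alt colors
  unfold detect_temperature_py detect_temperature_py_alt
  have h := fold_scores colors 0 0
  set R := (colors.map (fun cl => cl.1)).sum
  set B := (colors.map (fun cl => cl.2.2)).sum
  simp only []
  rw [h]
  by_cases h1 : R > B + 50
  · rw [if_pos (by omega : (0:Int) - 0 + (R - B) > 50), if_pos h1]
  · rw [if_neg (by omega : ¬ (0:Int) - 0 + (R - B) > 50), if_neg h1]
    by_cases h2 : B > R + 50
    · rw [if_pos (by omega : (0:Int) - 0 + (R - B) < -50), if_pos h2]
    · rw [if_neg (by omega : ¬ (0:Int) - 0 + (R - B) < -50), if_neg h2]
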